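-- pv_equiv track=rewrite | github.com/HarshitZom/instinct | utils/datautils.py | parse_context
-- ===== SOURCE A (Python) =====
-- def parse_context(context: str) -> str:
--     """Parse Codestral-style context (with +++++ markers) into filesep tags"""
--
--     if not context.strip():
--         return context
--
--     lines = context.split("\n")
--     result = []
--     current_content = []
--
--     for line in lines:
--         if line.startswith("+++++"):
--             # If we have accumulated content, close the previous snippet
--             if current_content:
--                 result.append("<|snippet|>")
--                 # Remove trailing empty lines from current_content
--                 while current_content and current_content[-1] == "":
--                     current_content.pop()
--                 result.extend(current_content)
--                 result.append("\n")
--                 current_content = []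
--
--             # Start new file section
--             filename = line[5:].strip()  # Remove '+++++' prefix
--             result.append(f"<|context_file|> {filename}")
--         else:
--             # Accumulate content lines
--             current_content.append(line)
--
--     # Handle the last file's content
--     if current_content:
--         result.append("<|snippet|>")
--         # Remove trailing empty lines before adding end tag
--         while current_content and current_content[-1] == "":
--             current_content.pop()
--         result.extend(current_content)
--
--     context = "\n".join(result)
--
--     context = context.replace("<|editable_region_start|>", "")
--     context = context.replace("<|editable_region_end|>", "")
--     context = context.replace("<|user_cursor_is_here|>", "")
--     return context
-- ===== SOURCE B (Python) =====
-- def _rtrim(ls):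
--     while ls and ls[-1] == "":
--         ls = ls[:-1]
--     return ls
--
--
-- def parse_context(context: str) -> str:
--     """Parse Codestral-style context (with +++++ markers) into filesep tags"""
--
--     if not context.strip():
--         return context
--
--     # Group the lines into blocks: a headless leading block, then one block
--     # per '+++++' marker line (filename plus the content lines that follow it).
--     blocks = []
--     cur = (None, [])
--     for line in context.split("\n"):
--         if line.startswith("+++++"):
--             blocks.append(cur)
--             cur = (line[5:].strip(), [])
--         else:
--             cur[1].append(line)
--     blocks.append(cur)
--
--     # Emit the tags block by block; every block except the last one gets a
--     # standalone "\n" element after its snippet.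
--     result = []
--     for i, (name, content) in enumerate(blocks):
--         if name is not None:
--             result.append("<|context_file|> " + name)
--         if content:
--             result.append("<|snippet|>")
--             result.extend(_rtrim(content))
--             if i != len(blocks) - 1:
--                 result.append("\n")
--
--     out = "\n".join(result)
--     out = out.replace("<|editable_region_start|>", "")
--     out = out.replace("<|editable_region_end|>", "")
--     out = out.replace("<|user_cursor_is_here|>", "")
--     return out
-- ===== Notes on version B (the rewrite author's own statement) =====
-- stated objective: alternative
-- what changed: Replaced A's single stateful scan (result list plus mutable current_content flushed at each marker) by a two-phase decomposition: first group the lines into blocks (a headless leading block, then one block per marker line), then emit the tags block by block, adding the standalone newline separator element to every block except the last.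
import Mathlib
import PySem

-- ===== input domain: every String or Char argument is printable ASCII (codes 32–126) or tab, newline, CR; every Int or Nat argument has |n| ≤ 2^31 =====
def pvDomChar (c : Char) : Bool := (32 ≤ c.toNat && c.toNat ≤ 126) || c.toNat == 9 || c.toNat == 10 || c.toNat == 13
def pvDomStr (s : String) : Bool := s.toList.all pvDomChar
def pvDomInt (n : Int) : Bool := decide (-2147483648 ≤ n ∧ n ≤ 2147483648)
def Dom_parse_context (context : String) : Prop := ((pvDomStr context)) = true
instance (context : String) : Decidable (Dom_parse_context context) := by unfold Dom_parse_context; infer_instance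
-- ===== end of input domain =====

-- B replaces the single stateful scan by a two-phase decomposition (group lines into blocks, then emit tags per block); objective: alternative decomposition, same cost.


-- ===== PORT A =====
-- the `while current_content and current_content[-1] == "": current_content.pop()` loop
def pcRtrimA (ls : List String) : List String :=
  if ls.getLast? = some "" then pcRtrimA ls.dropLast else ls
termination_by ls.length
decreasing_by
  rename_i h
  have hne : ls ≠ [] := by intro he; simp [he] at h
  simp [List.length_dropLast]
  exact List.length_pos_of_ne_nil hne

-- the `for line in lines:` loop, state = (result, current_content)
def pcLoopA : List String → List String × List String → List String × List String
  | [], st => st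
  | line :: rest, (result, cur) =>
    if PySem.Str.startswith line "+++++" then
      let result := if cur ≠ [] then result ++ ["<|snippet|>"] ++ pcRtrimA cur ++ ["\n"] else result
      let filename := PySem.Str.strip (PySem.Str.slice line (some 5) none)
      pcLoopA rest (result ++ ["<|context_file|> " ++ filename], [])
    else
      pcLoopA rest (result, cur ++ [line])

-- the post-loop `if current_content:` flush
def pcFinishA (st : List String × List String) : List String :=
  if st.2 ≠ [] then st.1 ++ ["<|snippet|>"] ++ pcRtrimA st.2 else st.1

def parse_context (context : String) : String :=
  if PySem.Str.strip context = "" then context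
  else
    -- sep "\n" is non-empty, so split? is `some`: take it with getD
    let lines := (PySem.Str.split? context "\n").getD []
    let result := pcFinishA (pcLoopA lines ([], []))
    let c := PySem.Str.join "\n" result
    let c := PySem.Str.replace c "<|editable_region_start|>" ""
    let c := PySem.Str.replace c "<|editable_region_end|>" ""
    PySem.Str.replace c "<|user_cursor_is_here|>" ""

-- ===== PORT B =====
-- the `while ls and ls[-1] == "": ls = ls[:-1]` loop of _rtrim
def pcRtrimB (ls : List String) : List String :=
  if ls ≠ [] ∧ ls.getLast? = some "" then pcRtrimB ls.dropLast else ls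
termination_by ls.length
decreasing_by
  rename_i h
  simp [List.length_dropLast]
  exact List.length_pos_of_ne_nil h.1

-- phase 1: group the lines into blocks (name?, content)
def pcBlocksB : List String → List (Option String × List String) →
    Option String × List String → List (Option String × List String)
  | [], out, cur => out ++ [cur]
  | line :: rest, out, cur =>
    if PySem.Str.startswith line "+++++" then
      pcBlocksB rest (out ++ [cur])
        (some (PySem.Str.strip (PySem.Str.slice line (some 5) none)), [])
    else
      pcBlocksB rest out (cur.1, cur.2 ++ [line])

-- phase 2: emit tags per block; `rest ≠ []` is Python's `i != len(blocks) - 1`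
def pcEmitB : List (Option String × List String) → List String
  | [] => []
  | (name, content) :: rest =>
    (match name with
      | some f => ["<|context_file|> " ++ f]
      | none => []) ++
    (if content ≠ [] then
       ["<|snippet|>"] ++ pcRtrimB content ++ (if rest ≠ [] then ["\n"] else [])
     else []) ++
    pcEmitB rest

def parse_context_alt (context : String) : String :=
  if PySem.Str.strip context = "" then context
  else
    -- sep "\n" is non-empty, so split? is `some`: take it with getD
    let blocks := pcBlocksB ((PySem.Str.split? context "\n").getD []) [] (none, [])
    let out := PySem.Str.join "\n" (pcEmitB blocks)
    let out := PySem.Str.replace out "<|editable_region_start|>" ""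
    let out := PySem.Str.replace out "<|editable_region_end|>" ""
    PySem.Str.replace out "<|user_cursor_is_here|>" ""

-- ===== PRECONDITION & SPEC =====
def Spec_parse_context (context : String) (out : String) : Prop := out = parse_context_alt context
instance (context : String) (out : String) : Decidable (Spec_parse_context context out) := by unfold Spec_parse_context; infer_instance

-- ===== CLAIM (what is proved, stated in full; the proofs are below) =====
def Claim_equal_parse_context : Prop := ∀ (context : String), Dom_parse_context context → Spec_parse_context context (parse_context context)

-- ===== LEMMAS AND PROOFS =====
theorem pcRtrim_eq (ls : List String) : pcRtrimA ls = pcRtrimB ls := by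
  rw [pcRtrimA, pcRtrimB]
  by_cases h : ls.getLast? = some ""
  · have hne : ls ≠ [] := by intro he; simp [he] at h
    rw [if_pos h, if_pos (show ls ≠ [] ∧ ls.getLast? = some "" from ⟨hne, h⟩)]
    exact pcRtrim_eq ls.dropLast
  · rw [if_neg h, if_neg (fun hc => h hc.2)]
termination_by ls.length
decreasing_by
  simp [List.length_dropLast]
  exact List.length_pos_of_ne_nil hne

theorem pcBlocksB_out (lines : List String) :
    ∀ out cur, pcBlocksB lines out cur = out ++ pcBlocksB lines [] cur := by
  induction lines with
  | nil => intro out cur; simp [pcBlocksB]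
  | cons line rest ih =>
    intro out cur
    by_cases h : PySem.Str.startswith line "+++++" = true
    · simp only [pcBlocksB, h, if_true, List.nil_append]
      rw [ih (out ++ [cur]), ih [cur]]
      simp
    · simp only [pcBlocksB, h]
      exact ih out _

theorem pcBlocksB_head (lines : List String) :
    ∀ cur nm, ∃ c t, pcBlocksB lines [] (nm, cur) = (nm, c) :: t ∧
      pcBlocksB lines [] (none, cur) = (none, c) :: t := by
  induction lines with
  | nil => intro cur nm; exact ⟨cur, [], by simp [pcBlocksB], by simp [pcBlocksB]⟩
  | cons line rest ih =>
    intro cur nm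
    by_cases h : PySem.Str.startswith line "+++++" = true
    · refine ⟨cur, pcBlocksB rest [] (some (PySem.Str.strip (PySem.Str.slice line (some 5) none)), []), ?_, ?_⟩ <;>
        · simp only [pcBlocksB, h, if_true, List.nil_append]
          rw [pcBlocksB_out]
          simp
    · simp only [pcBlocksB, h]
      exact ih (cur ++ [line]) nm

theorem pcEmitB_name (lines : List String) (cur : List String) (nm : Option String) :
    pcEmitB (pcBlocksB lines [] (nm, cur)) =
      (match nm with | some f => ["<|context_file|> " ++ f] | none => []) ++
        pcEmitB (pcBlocksB lines [] (none, cur)) := by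
  obtain ⟨c, t, h1, h2⟩ := pcBlocksB_head lines cur nm
  rw [h1, h2]
  cases nm <;> simp [pcEmitB]

theorem pcBlocksB_ne_nil (lines : List String) (cur : Option String × List String) :
    pcBlocksB lines [] cur ≠ [] := by
  induction lines generalizing cur with
  | nil => simp [pcBlocksB]
  | cons line rest ih =>
    by_cases h : PySem.Str.startswith line "+++++" = true
    · simp only [pcBlocksB, h, if_true, List.nil_append]
      rw [pcBlocksB_out]
      simp
    · simp only [pcBlocksB, h]
      exact ih _

theorem pcLoop_eq_blocks (lines : List String) :
    ∀ result cur, pcFinishA (pcLoopA lines (result, cur)) =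
      result ++ pcEmitB (pcBlocksB lines [] (none, cur)) := by
  induction lines with
  | nil =>
    intro result cur
    simp only [pcLoopA, pcBlocksB, pcFinishA, pcEmitB, List.nil_append]
    by_cases h : cur = []
    · simp [h]
    · simp [h, pcRtrim_eq]
  | cons line rest ih =>
    intro result cur
    by_cases h : PySem.Str.startswith line "+++++" = true
    · simp only [pcLoopA, pcBlocksB, h, if_true, List.nil_append]
      rw [ih]
      rw [pcBlocksB_out rest [(none, cur)]]
      have hhd : pcEmitB ((none, cur) :: pcBlocksB rest [] (some (PySem.Str.strip (PySem.Str.slice line (some 5) none)), [])) =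
          (if cur ≠ [] then ["<|snippet|>"] ++ pcRtrimB cur ++ ["\n"] else []) ++
            pcEmitB (pcBlocksB rest [] (some (PySem.Str.strip (PySem.Str.slice line (some 5) none)), [])) := by
        simp only [pcEmitB, List.nil_append]
        by_cases hc : cur = []
        · simp [hc]
        · simp [hc, pcBlocksB_ne_nil]
      rw [List.singleton_append, hhd,
        pcEmitB_name rest [] (some (PySem.Str.strip (PySem.Str.slice line (some 5))))]
      by_cases hc : cur = []
      · simp [hc]
      · simp [hc, pcRtrim_eq]
    · simp only [pcLoopA, pcBlocksB, h]
      exact ih result (cur ++ [line])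

-- ===== VERDICT (by name: the statement is the Claim_ definition above) =====
theorem parse_context_spec : Claim_equal_parse_context := by
  intro context _
  unfold Spec_parse_context parse_context parse_context_alt
  by_cases h : PySem.Str.strip context = ""
  · simp [h]
  · simp only [h, if_false]
    rw [pcLoop_eq_blocks]
    simp
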